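-- pv_equiv track=rewrite | github.com/BS-Algo/Algorithm | minjaeYoon/2025/2025-04/0429.py | solution
-- ===== SOURCE A (Python) =====
-- def solution(rny_string):
--     answer = ''
--     rny_string = list(rny_string)
--
--     for i in range(len(rny_string)):
--         if rny_string[i] == 'm':
--             rny_string[i] = 'rn'
--
--     answer = ''.join(rny_string)
--
--     return answer
-- ===== SOURCE B (Python) =====
-- def solution(rny_string):
--     return 'rn'.join(rny_string.split('m'))
-- ===== Notes on version B (the rewrite author's own statement) =====
-- stated objective: idiomatic
-- what changed: B splits the string on the separator character and joins the chunks with the replacement, instead of A's per-character index loop that rewrites entries in a list copy and joins it back.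
import Mathlib
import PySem

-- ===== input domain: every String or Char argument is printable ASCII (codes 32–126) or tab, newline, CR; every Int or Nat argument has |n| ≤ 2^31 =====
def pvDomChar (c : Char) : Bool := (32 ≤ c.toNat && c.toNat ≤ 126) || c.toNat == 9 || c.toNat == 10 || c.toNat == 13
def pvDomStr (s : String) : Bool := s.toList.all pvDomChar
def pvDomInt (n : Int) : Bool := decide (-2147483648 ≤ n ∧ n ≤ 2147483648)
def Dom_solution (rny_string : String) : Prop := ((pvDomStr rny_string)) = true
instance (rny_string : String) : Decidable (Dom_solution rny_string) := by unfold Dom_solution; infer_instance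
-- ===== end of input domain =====

-- B replaces A's per-character loop by split-on-'m' + join-with-'rn' (idiomatic; same result).

-- ===== PORT A =====
-- for each character: if it is 'm' it becomes "rn", else it stays; then ''.join
def solution (rny_string : String) : String :=
  PySem.Str.join "" (rny_string.toList.map (fun c => if c == 'm' then "rn" else String.ofList [c]))

-- ===== PORT B =====
-- 'rn'.join(rny_string.split('m')); the separator "m" is non-empty so Chars.splitOn is exact
def solution_alt (rny_string : String) : String :=
  PySem.Str.join "rn" ((PySem.Chars.splitOn rny_string.toList ['m']).map String.ofList)

-- ===== PRECONDITION & SPEC =====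
def Spec_solution (rny_string : String) (out : String) : Prop := out = solution_alt rny_string
instance (rny_string : String) (out : String) : Decidable (Spec_solution rny_string out) := by unfold Spec_solution; infer_instance

-- ===== CLAIM (what is proved, stated in full; the proofs are below) =====
def Claim_equal_solution : Prop := ∀ (rny_string : String), Dom_solution rny_string → Spec_solution rny_string (solution rny_string)

-- ===== LEMMAS AND PROOFS =====

/-- reference splitter on a single 'm' separator -/
def split1 : List Char → List (List Char)
  | [] => [[]]
  | c :: rest => if c = 'm' then [] :: split1 rest else
      match split1 rest with
      | [] => [[c]]
      | x :: xs => (c :: x) :: xs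

def consHead (p : List Char) : List (List Char) → List (List Char)
  | [] => [p]
  | x :: xs => (p ++ x) :: xs

lemma split1_ne_nil (l : List Char) : split1 l ≠ [] := by
  cases l with
  | nil => simp [split1]
  | cons c rest =>
    simp only [split1]
    split_ifs
    · simp
    · cases h : split1 rest <;> simp

lemma consHead_nil (xs : List (List Char)) (h : xs ≠ []) : consHead [] xs = xs := by
  cases xs with
  | nil => exact absurd rfl h
  | cons x t => simp [consHead]

lemma consHead_consHead (p q : List Char) (xs : List (List Char)) :
    consHead p (consHead q xs) = consHead (p ++ q) xs := by
  cases xs <;> simp [consHead]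

lemma split1_cons_of_ne (c : Char) (rest : List Char) (h : ¬ c = 'm') :
    split1 (c :: rest) = consHead [c] (split1 rest) := by
  simp only [split1, if_neg h]
  cases hs : split1 rest <;> simp [consHead]

lemma go_spec (fuel : Nat) : ∀ (l cur : List Char) (accl : List (List Char)),
    l.length < fuel →
    PySem.Chars.splitOn.go ['m'] fuel l cur accl = accl.reverse ++ consHead cur.reverse (split1 l) := by
  induction fuel with
  | zero => intro l cur accl h; omega
  | succ fuel ih =>
    intro l cur accl h
    cases l with
    | nil =>
      simp [PySem.Chars.splitOn.go, split1, consHead]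
    | cons c rest =>
      by_cases hc : c = 'm'
      · subst hc
        have hpre : List.isPrefixOf ['m'] ('m' :: rest) = true := by simp [List.isPrefixOf]
        rw [show PySem.Chars.splitOn.go ['m'] (fuel + 1) ('m' :: rest) cur accl
              = PySem.Chars.splitOn.go ['m'] fuel (List.drop 1 ('m' :: rest)) [] (cur.reverse :: accl) by
            conv_lhs => rw [PySem.Chars.splitOn.go]
            simp [hpre]]
        simp only [List.drop_succ_cons, List.drop_zero]
        rw [ih rest [] (cur.reverse :: accl) (by simpa using Nat.lt_of_succ_lt_succ h)]
        cases hs : split1 rest with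
        | nil => exact absurd hs (split1_ne_nil rest)
        | cons x xs => simp [split1, consHead, hs]
      · have hpre : List.isPrefixOf ['m'] (c :: rest) = false := by
          simp [List.isPrefixOf]; exact fun hh => (hc hh.symm).elim
        rw [show PySem.Chars.splitOn.go ['m'] (fuel + 1) (c :: rest) cur accl
              = PySem.Chars.splitOn.go ['m'] fuel rest (c :: cur) accl by
            conv_lhs => rw [PySem.Chars.splitOn.go]
            simp [hpre]]
        rw [ih rest (c :: cur) accl (by simpa using Nat.lt_of_succ_lt_succ h)]
        rw [split1_cons_of_ne c rest hc, consHead_consHead]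
        simp

lemma splitOn_eq_split1 (cs : List Char) : PySem.Chars.splitOn cs ['m'] = split1 cs := by
  unfold PySem.Chars.splitOn
  rw [go_spec (cs.length + 1) cs [] [] (by omega)]
  simp [consHead_nil _ (split1_ne_nil cs)]

def frn (c : Char) : List Char := if c = 'm' then ['r', 'n'] else [c]

lemma join_split1 (cs : List Char) :
    PySem.Chars.join ['r', 'n'] (split1 cs) = cs.flatMap frn := by
  induction cs with
  | nil => simp [split1, PySem.Chars.join, List.intercalate]
  | cons c rest ih =>
    by_cases hc : c = 'm'
    · subst hc
      rw [show split1 ('m' :: rest) = [] :: split1 rest from by simp [split1]]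
      rw [show PySem.Chars.join ['r','n'] ([] :: split1 rest)
            = ['r','n'] ++ PySem.Chars.join ['r','n'] (split1 rest) by
          cases hs : split1 rest with
          | nil => exact absurd hs (split1_ne_nil rest)
          | cons x xs => simp [PySem.Chars.join, List.intercalate, List.intersperse]]
      simp [ih, frn]
    · rw [split1_cons_of_ne c rest hc]
      rw [show PySem.Chars.join ['r','n'] (consHead [c] (split1 rest))
            = c :: PySem.Chars.join ['r','n'] (split1 rest) by
          cases hs : split1 rest with
          | nil => exact absurd hs (split1_ne_nil rest)
          | cons x xs =>
            cases xs <;> simp [consHead, PySem.Chars.join, List.intercalate, List.intersperse]]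
      simp [ih, List.flatMap_cons, frn, hc]

lemma flatten_intersperse_nil (l : List (List Char)) :
    (List.intersperse ([] : List Char) l).flatten = l.flatten := by
  induction l with
  | nil => rfl
  | cons a t ih =>
    cases t with
    | nil => rfl
    | cons b t' => simp_all [List.intersperse]

theorem solution_spec : Claim_equal_solution := by
  unfold Claim_equal_solution
  intro s _
  unfold Spec_solution solution solution_alt
  apply String.ext  -- equality of toList
  rw [PySem.Str.toList_join, PySem.Str.toList_join]
  have h1 : (s.toList.map (fun c => if c == 'm' then "rn" else String.ofList [c])).map String.toList
      = s.toList.map frn := by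
    simp only [List.map_map]
    apply List.map_congr_left
    intro c _
    by_cases hc : c = 'm' <;> simp [frn, hc, String.toList_ofList]
  have h2 : ((PySem.Chars.splitOn s.toList ['m']).map String.ofList).map String.toList
      = split1 s.toList := by
    rw [splitOn_eq_split1]
    rw [List.map_map]
    apply List.map_id'' -- pointwise: toList ∘ ofList = id
    intro x
    simp [Function.comp]
  rw [h1, h2]
  rw [show ("rn" : String).toList = ['r','n'] from rfl, join_split1]
  rw [show ("" : String).toList = [] from rfl]
  simp [PySem.Chars.join, List.intercalate, List.flatMap, flatten_intersperse_nil]
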